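-- pv_equiv track=rewrite | github.com/JoseAntony07/Interview | interview_program.py | max_chars_between_same
-- ===== SOURCE A (Python) =====
-- def max_chars_between_same(input_str):
--     max_distance = 0
--     char_positions = {}
--
--     for i, char in enumerate(input_str):
--         if char in char_positions:
--             distance = i - char_positions[char] - 1
--             max_distance = max(max_distance, distance)
--
--         char_positions[char] = i
--
--     return max_distance
-- ===== SOURCE B (Python) =====
-- def max_chars_between_same(input_str):
--     positions = {}
--     for i, ch in enumerate(input_str):
--         positions.setdefault(ch, []).append(i)
--     best = 0
--     for p in positions.values():
--         for a, b in zip(p, p[1:]):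
--             best = max(best, b - a - 1)
--     return best
-- ===== Notes on version B (the rewrite author's own statement) =====
-- stated objective: alternative
-- what changed: B first groups all indices of each character into per-character position lists in one pass, then a separate second pass computes the maximum consecutive-pair gap per list, instead of A's single pass that keeps only the last seen position and a running maximum.
import Mathlib
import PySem

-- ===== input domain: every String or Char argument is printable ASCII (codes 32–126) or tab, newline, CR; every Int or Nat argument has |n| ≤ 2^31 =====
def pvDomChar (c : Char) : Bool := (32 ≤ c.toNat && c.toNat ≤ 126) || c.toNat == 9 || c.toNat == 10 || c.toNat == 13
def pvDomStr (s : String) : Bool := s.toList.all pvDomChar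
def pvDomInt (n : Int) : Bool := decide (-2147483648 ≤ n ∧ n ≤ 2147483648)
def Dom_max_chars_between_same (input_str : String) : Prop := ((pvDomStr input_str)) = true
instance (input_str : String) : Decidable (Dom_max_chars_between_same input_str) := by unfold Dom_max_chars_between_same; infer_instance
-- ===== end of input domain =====

-- B replaces A's single pass (last-position dict + running max) by a grouping pass that
-- records ALL positions of each character, followed by a second pass over the per-character
-- position lists taking the max consecutive gap; an alternative decomposition, not faster.

-- ===== PORT A =====
-- loop body of A: state = (max_distance, char_positions)
def pvStepA (st : Int × PySem.Dict Char Int) (ic : Int × Char) : Int × PySem.Dict Char Int :=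
  (if st.2.contains ic.2 then max st.1 (ic.1 - st.2.getD ic.2 0 - 1) else st.1,
   st.2.insert ic.2 ic.1)

def max_chars_between_same (input_str : String) : Int :=
  ((PySem.List.enumerate input_str.toList 0).foldl pvStepA (0, PySem.Dict.empty)).1

-- ===== PORT B =====
-- grouping loop body of B: positions.setdefault(ch, []).append(i)
def pvStepB (d : PySem.Dict Char (List Int)) (ic : Int × Char) : PySem.Dict Char (List Int) :=
  d.modify ic.2 [] (· ++ [ic.1])

-- inner loop of B: for a, b in zip(p, p[1:]): best = max(best, b - a - 1)   (p[1:] = p.drop 1, exact for a list)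
def pvInner (p : List Int) (b : Int) : Int :=
  (p.zip (p.drop 1)).foldl (fun b q => max b (q.2 - q.1 - 1)) b

-- outer loop of B over positions.values()
def pvOuter (vs : List (List Int)) (b : Int) : Int :=
  vs.foldl (fun b p => pvInner p b) b

def max_chars_between_same_alt (input_str : String) : Int :=
  let positions := (PySem.List.enumerate input_str.toList 0).foldl pvStepB PySem.Dict.empty
  pvOuter positions.values 0

-- ===== PRECONDITION & SPEC =====
def Spec_max_chars_between_same (input_str : String) (out : Int) : Prop := out = max_chars_between_same_alt input_str
instance (input_str : String) (out : Int) : Decidable (Spec_max_chars_between_same input_str out) := by unfold Spec_max_chars_between_same; infer_instance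

-- ===== CLAIM (what is proved, stated in full; the proofs are below) =====
def Claim_equal_max_chars_between_same : Prop := ∀ (input_str : String), Dom_max_chars_between_same input_str → Spec_max_chars_between_same input_str (max_chars_between_same input_str)

-- ===== LEMMAS AND PROOFS =====

-- the max-accumulator commutes out of B's inner fold
lemma foldl_max_out (qs : List (Int × Int)) (b v : Int) :
    qs.foldl (fun b q => max b (q.2 - q.1 - 1)) (max b v)
      = max (qs.foldl (fun b q => max b (q.2 - q.1 - 1)) b) v := by
  induction qs generalizing b with
  | nil => rfl
  | cons q qs ih =>
      simp only [List.foldl_cons]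
      rw [max_right_comm, ih]

lemma pvInner_max_out (p : List Int) (b v : Int) :
    pvInner p (max b v) = max (pvInner p b) v := by
  unfold pvInner; exact foldl_max_out _ b v

lemma pvOuter_max_out (vs : List (List Int)) (b v : Int) :
    pvOuter vs (max b v) = max (pvOuter vs b) v := by
  induction vs generalizing b with
  | nil => rfl
  | cons p vs ih =>
      simp only [pvOuter, List.foldl_cons] at *
      rw [pvInner_max_out, ih]

lemma pvOuter_append (xs ys : List (List Int)) (b : Int) :
    pvOuter (xs ++ ys) b = pvOuter ys (pvOuter xs b) := by
  simp [pvOuter, List.foldl_append]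

-- the consecutive-pair list of l ++ [i]
lemma zip_gaps_concat (l : List Int) (h : l ≠ []) (i : Int) :
    (l ++ [i]).zip ((l ++ [i]).drop 1) = l.zip (l.drop 1) ++ [(l.getLast h, i)] := by
  induction l with
  | nil => exact absurd rfl h
  | cons a l ih =>
      cases l with
      | nil => rfl
      | cons a' l' =>
          have h' : a' :: l' ≠ [] := by simp
          have ih' := ih h'
          simp only [List.cons_append, List.drop_succ_cons, List.drop_zero,
            List.zip_cons_cons, List.getLast_cons h'] at ih' ⊢
          exact congrArg _ ih'

lemma pvInner_concat (l : List Int) (h : l ≠ []) (i b : Int) :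
    pvInner (l ++ [i]) b = max (pvInner l b) (i - l.getLast h - 1) := by
  unfold pvInner
  rw [zip_gaps_concat l h i, List.foldl_append]
  rfl

-- appending a fresh singleton group does not change the maximum
lemma pvOuter_concat_singleton (vs : List (List Int)) (i b : Int) :
    pvOuter (vs ++ [[i]]) b = pvOuter vs b := by
  rw [pvOuter_append]; rfl

-- extending one group's list by one position raises the maximum by exactly that gap
lemma pvOuter_extend (xs ys : List (List Int)) (l : List Int) (h : l ≠ []) (i b : Int) :
    pvOuter (xs ++ (l ++ [i]) :: ys) b
      = max (pvOuter (xs ++ l :: ys) b) (i - l.getLast h - 1) := by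
  rw [show (l ++ [i]) :: ys = [l ++ [i]] ++ ys by rfl,
      show l :: ys = [l] ++ ys by rfl,
      ← List.append_assoc, ← List.append_assoc,
      pvOuter_append, pvOuter_append (xs ++ [l]) ys]
  rw [pvOuter_append, pvOuter_append xs [l]]
  show pvOuter ys (pvInner (l ++ [i]) (pvOuter xs b))
      = max (pvOuter ys (pvInner l (pvOuter xs b))) (i - l.getLast h - 1)
  rw [pvInner_concat l h, pvOuter_max_out]

-- split an items list with nodup keys at a contained key
lemma split_items (its : List (Char × List Int)) (c : Char)
    (hnd : (its.map (·.1)).Nodup) (hc : c ∈ its.map (·.1)) :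
    ∃ xs l ys, its = xs ++ (c, l) :: ys ∧ (∀ p ∈ xs, p.1 ≠ c) ∧ (∀ p ∈ ys, p.1 ≠ c) := by
  induction its with
  | nil => simp at hc
  | cons a its ih =>
      simp only [List.map_cons, List.nodup_cons] at hnd
      rcases hnd with ⟨ha, hnd⟩
      by_cases hac : a.1 = c
      · refine ⟨[], a.2, its, ?_, by simp, ?_⟩
        · simp [← hac]
        · intro p hp hpc
          apply ha
          rw [hac, ← hpc]
          exact List.mem_map_of_mem (f := fun x => x.1) hp
      · have hc' : c ∈ its.map (·.1) := by
          rcases List.mem_cons.1 hc with h | h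
          · exact absurd h.symm hac
          · exact h
        rcases ih hnd hc' with ⟨xs, l, ys, heq, hxs, hys⟩
        exact ⟨a :: xs, l, ys, by rw [heq]; rfl, by
          intro p hp
          rcases List.mem_cons.1 hp with h | h
          · exact h ▸ hac
          · exact hxs p h, hys⟩

lemma map_replace (xs ys : List (Char × List Int)) (c : Char) (l nl : List Int)
    (hxs : ∀ p ∈ xs, p.1 ≠ c) (hys : ∀ p ∈ ys, p.1 ≠ c) :
    (xs ++ (c, l) :: ys).map (fun p => if (p.1 == c) = true then (c, nl) else p)
      = xs ++ (c, nl) :: ys := by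
  rw [List.map_append, List.map_cons]
  congr 1
  · rw [List.map_eq_iff]
    intro k
    cases h : xs[k]? with
    | none => simp
    | some p =>
        have := hxs p (List.mem_of_getElem? h)
        simp [this]
  · congr 1
    · simp
    · rw [List.map_eq_iff]
      intro k
      cases h : ys[k]? with
      | none => simp
      | some p =>
          have := hys p (List.mem_of_getElem? h)
          simp [this]

-- the main invariant: A's running state corresponds to B's grouping dict
lemma main_inv (es : List (Int × Char)) (m : Int)
    (dA : PySem.Dict Char Int) (dB : PySem.Dict Char (List Int))
    (hk : dA.keys = dB.keys) (hnd : dB.keys.Nodup)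
    (hv : ∀ c, dA.get? c = (dB.getD c []).getLast?)
    (hm : m = pvOuter dB.values 0) :
    (es.foldl pvStepA (m, dA)).1 = pvOuter ((es.foldl pvStepB dB).values) 0 := by
  induction es generalizing m dA dB with
  | nil => exact hm
  | cons ic es ih =>
      obtain ⟨i, c⟩ := ic
      have hcc : dA.contains c = dB.contains c := by
        simp [PySem.Dict.contains_eq_decide_mem_keys, hk]
      by_cases hc : dB.contains c = true
      · -- the character was seen before
        have hAc : dA.contains c = true := hcc.trans hc
        set l := dB.getD c [] with hl
        have hsome : (dA.get? c).isSome := by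
          rw [← PySem.Dict.contains_eq_isSome_get?]; exact hAc
        have hlne : l ≠ [] := by
          intro h; rw [hv c, ← hl, h] at hsome; simp at hsome
        have hlast : dA.getD c 0 = l.getLast hlne := by
          rw [PySem.Dict.getD_eq_get?_getD, hv c, ← hl, List.getLast?_eq_some_getLast hlne]
          rfl
        -- unfold one step of both loops
        have hstepA : pvStepA (m, dA) (i, c)
            = (max m (i - dA.getD c 0 - 1), dA.insert c i) := by
          simp [pvStepA, hAc]
        have hstepB : pvStepB dB (i, c) = dB.insert c (l ++ [i]) := by
          simp [pvStepB, PySem.Dict.modify, hl]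
        rw [List.foldl_cons, List.foldl_cons, hstepA, hstepB]
        -- split dB.items at the entry for c
        have hcm : c ∈ dB.items.map (·.1) := by
          have : c ∈ dB.keys := by
            rw [← PySem.Dict.contains_iff_mem_keys]; exact hc
          simpa [PySem.Dict.keys] using this
        have hndi : (dB.items.map (·.1)).Nodup := by
          simpa [PySem.Dict.keys] using hnd
        rcases split_items dB.items c hndi hcm with ⟨xs, l0, ys, heq, hxs, hys⟩
        have hmem : (c, l0) ∈ dB.items := by rw [heq]; simp
        have hl0 : l0 = l := by
          have h1 : dB.getD c [] = l0 :=
            PySem.Dict.getD_of_mem_items dB hmem (by simpa [PySem.Dict.keys] using hnd) []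
          rw [← h1, hl]
        rw [hl0] at heq hmem
        have hitems : (dB.insert c (l ++ [i])).items = xs ++ (c, l ++ [i]) :: ys := by
          rw [PySem.Dict.items_insert_of_contains _ _ hc, heq, map_replace xs ys c l _ hxs hys]
        -- apply the induction hypothesis to the new states
        apply ih
        · rw [PySem.Dict.keys_insert_of_contains _ _ hAc,
              PySem.Dict.keys_insert_of_contains _ _ hc, hk]
        · rw [PySem.Dict.keys_insert_of_contains _ _ hc]; exact hnd
        · intro c'
          by_cases hcc' : c' = c
          · subst hcc'
            rw [PySem.Dict.get?_insert_self, PySem.Dict.getD_insert_self]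
            simp
          · rw [PySem.Dict.get?_insert_of_ne _ _ hcc', PySem.Dict.getD_insert_of_ne _ _ _ hcc']
            exact hv c'
        · -- new running max equals the new grouped maximum
          have hvals : (dB.insert c (l ++ [i])).values
              = xs.map (·.2) ++ (l ++ [i]) :: ys.map (·.2) := by
            simp [PySem.Dict.values, hitems]
          have hvals0 : dB.values = xs.map (·.2) ++ l :: ys.map (·.2) := by
            simp [PySem.Dict.values, heq]
          rw [hvals, pvOuter_extend _ _ l hlne, ← hvals0, ← hm, hlast]
      · -- first occurrence of the character
        have hAc : dA.contains c = false := by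
          rw [hcc]; exact Bool.not_eq_true _ ▸ hc
        have hstepA : pvStepA (m, dA) (i, c) = (m, dA.insert c i) := by
          simp [pvStepA, hAc]
        have hgd : dB.getD c [] = [] := PySem.Dict.getD_of_not_contains dB [] (by simpa using hc)
        have hstepB : pvStepB dB (i, c) = dB.insert c [i] := by
          simp [pvStepB, PySem.Dict.modify, hgd]
        rw [List.foldl_cons, List.foldl_cons, hstepA, hstepB]
        apply ih
        · rw [PySem.Dict.keys_insert_of_not_contains _ _ hAc,
              PySem.Dict.keys_insert_of_not_contains _ _ (by simpa using hc), hk]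
        · rw [PySem.Dict.keys_insert_of_not_contains _ _ (by simpa using hc)]
          refine List.Nodup.append hnd (by simp) ?_
          intro a ha hb
          simp only [List.mem_singleton] at hb
          subst hb
          have hck : a ∉ dB.keys := by
            simpa [PySem.Dict.contains_iff_mem_keys] using hc
          exact hck ha
        · intro c'
          by_cases hcc' : c' = c
          · subst hcc'
            rw [PySem.Dict.get?_insert_self, PySem.Dict.getD_insert_self]
            rfl
          · rw [PySem.Dict.get?_insert_of_ne _ _ hcc', PySem.Dict.getD_insert_of_ne _ _ _ hcc']
            exact hv c'
        · have hitems : (dB.insert c [i]).items = dB.items ++ [(c, [i])] :=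
            PySem.Dict.items_insert_of_not_contains _ _ (by simpa using hc)
          have : (dB.insert c [i]).values = dB.values ++ [[i]] := by
            simp [PySem.Dict.values, hitems]
          rw [this, pvOuter_concat_singleton]
          exact hm

-- ===== VERDICT (by name: the statement is the Claim_ definition above) =====
theorem max_chars_between_same_spec : Claim_equal_max_chars_between_same := by
  intro s _
  unfold Spec_max_chars_between_same max_chars_between_same max_chars_between_same_alt
  exact main_inv _ 0 PySem.Dict.empty PySem.Dict.empty rfl (by simp) (by intro c; rfl) rfl
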